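-- pv_equiv track=rewrite | github.com/ignaciomal/IMOVerano2024T1 | ejercicio7/.ipynb_checkpoints/clasefa-checkpoint.py | clases_fa
-- ===== SOURCE A (Python) =====
-- def clases_fa(arreglo):
--     f_d = {}
--
--     # Contar frecuencias de cada elemento
--     for item in arreglo:
--         if item in f_d:
--             f_d[item] += 1
--         else:
--             f_d[item] = 1
--
--     # Extraer clases y frecuencias en listas separadas
--     clases = list(f_d.keys())
--     frecuencias = list(f_d.values())
--
--     return clases, frecuencias
-- ===== SOURCE B (Python) =====
-- def clases_fa(arreglo):
--     arr = list(arreglo)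
--     clases = []
--     frecuencias = []
--     while arr:
--         x = arr[0]
--         rest = [y for y in arr if y != x]
--         clases.append(x)
--         frecuencias.append(len(arr) - len(rest))
--         arr = rest
--     return clases, frecuencias
-- ===== Notes on version B (the rewrite author's own statement) =====
-- stated objective: alternative
-- what changed: Replaces the dict-counting pass by a removal loop: repeatedly take the first remaining element as the next class, get its frequency as the length drop when all its occurrences are filtered out, and continue on the shrunk list; no dictionary, seen-set or count scan remains.
import Mathlib
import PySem

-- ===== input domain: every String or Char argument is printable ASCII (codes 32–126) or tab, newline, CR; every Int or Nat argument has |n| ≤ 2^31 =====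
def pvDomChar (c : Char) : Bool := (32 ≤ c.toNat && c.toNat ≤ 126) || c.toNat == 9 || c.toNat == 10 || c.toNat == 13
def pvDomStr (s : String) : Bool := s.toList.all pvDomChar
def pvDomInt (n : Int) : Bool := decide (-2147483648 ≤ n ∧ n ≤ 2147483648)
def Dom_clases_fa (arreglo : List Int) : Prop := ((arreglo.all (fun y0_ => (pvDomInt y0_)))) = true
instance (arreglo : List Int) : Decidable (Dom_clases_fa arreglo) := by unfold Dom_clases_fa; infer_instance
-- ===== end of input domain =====

-- B replaces A's dict-counting pass by a removal loop (next class = first remaining element,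
-- frequency = length drop after filtering it out): an alternative algorithm, not claimed faster.

-- ===== PORT A =====
def clases_fa (arreglo : List Int) : List Int × List Int :=
  let f_d : PySem.Dict Int Int :=
    arreglo.foldl (fun d item =>
      if d.contains item then d.insert item (d.getD item 0 + 1)
      else d.insert item 1) PySem.Dict.empty
  (f_d.keys, f_d.values)

-- ===== PORT B =====
-- the while loop of Source B: state (arr, clases, frecuencias); one iteration per class
def clases_fa_alt_go : List Int → List Int → List Int → List Int × List Int
  | [], cs, fs => (cs, fs)
  | x :: xs, cs, fs =>
      let rest := (x :: xs).filter (fun y => !(y == x))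
      clases_fa_alt_go rest (cs ++ [x]) (fs ++ [((x :: xs).length : Int) - (rest.length : Int)])
termination_by arr => arr.length
decreasing_by
  simp only [List.filter_cons, beq_self_eq_true, Bool.not_true, List.length_cons]
  exact Nat.lt_succ_of_le (List.length_filter_le _ _)

def clases_fa_alt (arreglo : List Int) : List Int × List Int :=
  clases_fa_alt_go arreglo [] []

-- ===== PRECONDITION & SPEC =====
def Spec_clases_fa (arreglo : List Int) (out : List Int × List Int) : Prop := out = clases_fa_alt arreglo
instance (arreglo : List Int) (out : List Int × List Int) : Decidable (Spec_clases_fa arreglo out) := by unfold Spec_clases_fa; infer_instance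

-- ===== CLAIM =====
def Claim_equal_clases_fa : Prop := ∀ (arreglo : List Int), Dom_clases_fa arreglo → Spec_clases_fa arreglo (clases_fa arreglo)

-- ===== LEMMAS AND PROOFS =====

-- A's loop body is the canonical counter step.
theorem stepA_eq :
    (fun (d : PySem.Dict Int Int) item =>
      if d.contains item then d.insert item (d.getD item 0 + 1)
      else d.insert item 1)
    = fun (d : PySem.Dict Int Int) x => d.insert x (d.getD x 0 + 1) := by
  funext d x
  by_cases h : d.contains x = true
  · simp [h]
  · simp only [Bool.not_eq_true] at h
    have h0 : d.getD x 0 = 0 := by simp [h, PySem.Dict.getD_of_not_contains]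
    simp [h, h0]

-- A in closed form: first occurrences and their multiplicities.
theorem clases_fa_eq (arreglo : List Int) :
    clases_fa arreglo
      = (PySem.Set.ofList arreglo,
         (PySem.Set.ofList arreglo).map (fun c => (arreglo.count c : Int))) := by
  unfold clases_fa
  rw [stepA_eq, PySem.Dict.foldl_insert_getD_add_one_eq_counter]
  simp [PySem.Dict.keys, PySem.Dict.values, PySem.Dict.items_counter, List.map_map,
    Function.comp_def]

-- set(xs) commutes with filtering.
theorem ofList_filter (p : Int → Bool) (xs : List Int) :
    PySem.Set.ofList (xs.filter p) = (PySem.Set.ofList xs).filter p := by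
  induction xs using List.reverseRecOn with
  | nil => rfl
  | append_singleton xs a ih =>
    rw [List.filter_append]
    by_cases hp : p a = true
    · simp only [List.filter_singleton, hp, cond_true]
      rw [PySem.Set.ofList_append_singleton, PySem.Set.ofList_append_singleton, ih]
      by_cases hm : a ∈ xs
      · simp [PySem.Set.add, PySem.Set.mem_ofList, List.mem_filter, hm, hp]
      · simp [PySem.Set.add, PySem.Set.mem_ofList, List.mem_filter, hm, hp,
          List.filter_append]
    · simp only [List.filter_singleton, hp, cond_false, List.append_nil]
      rw [PySem.Set.ofList_append_singleton, ih]
      by_cases hm : a ∈ xs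
      · simp [PySem.Set.add, PySem.Set.mem_ofList, hm]
      · simp [PySem.Set.add, PySem.Set.mem_ofList, hm, List.filter_append,
          List.filter_singleton, hp]

-- set(x::xs) = x followed by set of the list with all occurrences of x removed.
theorem ofList_cons_filter (x : Int) (xs : List Int) :
    PySem.Set.ofList (x :: xs)
      = x :: PySem.Set.ofList ((x :: xs).filter (fun y => !(y == x))) := by
  rw [PySem.Set.ofList_cons, PySem.Set.discard, List.filter_cons]
  simp only [beq_self_eq_true, Bool.not_true, Bool.false_eq_true, if_false]
  rw [ofList_filter]

-- the length drop when removing x is x's multiplicity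
theorem length_sub_filter (x : Int) (arr : List Int) :
    arr.length = (arr.filter (fun y => !(y == x))).length + arr.count x := by
  induction arr with
  | nil => rfl
  | cons a l ih =>
    rw [List.filter_cons, List.count_cons]
    by_cases h : a = x
    · subst h
      simp only [beq_self_eq_true, Bool.not_true, Bool.false_eq_true, if_false, if_true,
        List.length_cons]
      omega
    · have hb : (a == x) = false := by simp [h]
      simp only [hb, Bool.not_false, if_true, Bool.false_eq_true, if_false, List.length_cons]
      omega

-- multiplicities of the other classes are unchanged by removing x
theorem count_filter_ne (x c : Int) (arr : List Int) (h : c ≠ x) :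
    (arr.filter (fun y => !(y == x))).count c = arr.count c := by
  rw [List.count_filter]
  simp [h]

-- loop invariant: B's removal loop appends set(arr) and its multiplicities to the accumulators
theorem altGo_eq (arr cs fs : List Int) :
    clases_fa_alt_go arr cs fs
      = (cs ++ PySem.Set.ofList arr,
         fs ++ (PySem.Set.ofList arr).map (fun c => (arr.count c : Int))) := by
  induction arr, cs, fs using clases_fa_alt_go.induct with
  | case1 cs fs => simp [clases_fa_alt_go, PySem.Set.ofList_nil]
  | case2 x xs cs fs rest ih =>
    rw [clases_fa_alt_go, ih]
    have hlen := length_sub_filter x (x :: xs)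
    have hcx : ((x :: xs).length : Int) - ((((x :: xs).filter (fun y => !(y == x))).length : Nat) : Int)
        = (((x :: xs).count x : Nat) : Int) := by omega
    have hmap : (PySem.Set.ofList ((x :: xs).filter (fun y => !(y == x)))).map
          (fun c => ((((x :: xs).filter (fun y => !(y == x))).count c : Nat) : Int))
        = (PySem.Set.ofList ((x :: xs).filter (fun y => !(y == x)))).map
          (fun c => (((x :: xs).count c : Nat) : Int)) := by
      apply List.map_congr_left
      intro c hc
      have hcmem : c ∈ (x :: xs).filter (fun y => !(y == x)) := (PySem.Set.mem_ofList _ _).1 hc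
      have hcne : c ≠ x := by
        have := (List.mem_filter.1 hcmem).2
        simpa using this
      rw [count_filter_ne x c (x :: xs) hcne]
    rw [hmap, hcx, ofList_cons_filter x xs]
    simp
    show PySem.Set.ofList ((x :: xs).filter (fun y => !(y == x)))
        = PySem.Set.ofList (xs.filter (fun y => !(y == x)))
    rw [List.filter_cons]
    simp

-- B in the same closed form.
theorem clases_fa_alt_eq (arreglo : List Int) :
    clases_fa_alt arreglo
      = (PySem.Set.ofList arreglo,
         (PySem.Set.ofList arreglo).map (fun c => (arreglo.count c : Int))) := by
  unfold clases_fa_alt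
  rw [altGo_eq]
  simp

-- ===== VERDICT =====
theorem clases_fa_spec : Claim_equal_clases_fa := by
  intro arreglo _
  unfold Spec_clases_fa
  rw [clases_fa_eq, clases_fa_alt_eq]
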